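-- pv_equiv track=rewrite | github.com/ashuraGami/advent_code | anio2020/adventCode.py | puzzle5
-- ===== SOURCE A (Python) =====
-- def puzzle5(inputList):
--     c,n = 0,0
--     for i, v in enumerate(inputList):
--         if i == 0: continue
--         c += 3
--         if v[c%31]=="#":
--             n += 1
--     return n
-- ===== SOURCE B (Python) =====
-- def puzzle5(inputList):
--     # Precompute the period-31 column table once (3*i mod 31 repeats every 31 rows,
--     # since the grid is 31 wide), then consume the rows in chunks of 31 zipped
--     # against that fixed table -- no per-row counter and no per-row modulo.
--     pat = [(3 * k) % 31 for k in range(31)]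
--     pat = pat[1:] + pat[:1]  # aligned so pat[0] is the column of row 1
--     rows, n = inputList[1:], 0
--     while rows:
--         for row, col in zip(rows[:31], pat):
--             if row[col] == "#":
--                 n += 1
--         rows = rows[31:]
--     return n
-- ===== Notes on version B (the rewrite author's own statement) =====
-- stated objective: alternative
-- what changed: B precomputes the period-31 column table (3*k mod 31 for one full period) once and then consumes the rows in chunks of 31 zipped against that fixed table, replacing A's per-row running counter and per-row modulo with a staged table-plus-chunking traversal.
import Mathlib
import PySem

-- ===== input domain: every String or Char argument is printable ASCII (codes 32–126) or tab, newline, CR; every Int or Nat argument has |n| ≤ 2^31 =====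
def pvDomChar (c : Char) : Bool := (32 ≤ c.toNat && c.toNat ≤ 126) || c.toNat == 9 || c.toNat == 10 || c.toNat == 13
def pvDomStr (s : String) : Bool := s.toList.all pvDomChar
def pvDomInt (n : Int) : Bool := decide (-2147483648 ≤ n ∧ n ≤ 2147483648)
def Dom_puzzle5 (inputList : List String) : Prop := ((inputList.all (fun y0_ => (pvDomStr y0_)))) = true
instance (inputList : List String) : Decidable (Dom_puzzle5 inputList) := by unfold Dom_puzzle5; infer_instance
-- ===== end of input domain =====

-- B replaces A's per-row running counter and per-row modulo with a precomputed
-- period-31 column table consumed against the rows in chunks of 31 (objective: alternative).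


-- ===== PORT A =====
-- for i, v in enumerate(inputList): skip i==0; c += 3; if v[c%31]=="#": n += 1
def puzzle5 (inputList : List String) : Int :=
  ((PySem.List.enumerate inputList 0).foldl
    (fun (st : Int × Int) iv =>
      if iv.1 = 0 then st
      else
        let c := st.1 + 3
        (c, if PySem.Str.pyGet? iv.2 (PySem.Int.mod c 31) = some '#' then st.2 + 1 else st.2))
    (0, 0)).2

-- ===== PORT B =====
-- pat = [(3*k)%31 for k in range(31)]; pat = pat[1:] + pat[:1]
def pvPat : List Int :=
  let pat := (PySem.List.pyRange 0 31 1).map (fun k => PySem.Int.mod (3 * k) 31)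
  PySem.List.slice pat (some 1) none ++ PySem.List.slice pat none (some 1)

-- for row, col in zip(rows[:31], pat): if row[col] == "#": n += 1
def pvInner (chunk : List String) (pat : List Int) (n : Int) : Int :=
  (chunk.zip pat).foldl
    (fun n rc => if PySem.Str.pyGet? rc.1 rc.2 = some '#' then n + 1 else n) n

-- while rows: <inner loop over the first 31 rows>; rows = rows[31:]
def pvChunks (rows : List String) (pat : List Int) (n : Int) : Int :=
  if h : rows = [] then n
  else pvChunks (PySem.List.slice rows (some 31) none) pat
        (pvInner (PySem.List.slice rows none (some 31)) pat n)
termination_by rows.length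
decreasing_by
  rw [PySem.List.slice_from _ (by norm_num)]
  have : rows.length ≠ 0 := by simpa [List.length_eq_zero_iff] using h
  simp only [List.length_drop]
  omega

def puzzle5_alt (inputList : List String) : Int :=
  pvChunks (PySem.List.slice inputList (some 1) none) pvPat 0

-- ===== PRECONDITION & SPEC =====
-- Pre_ excludes exactly the inputs on which Python raises IndexError: a row at index i ≥ 1
-- shorter than (3*i) % 31 + 1 characters (both A and B raise there; the ports are total).
def Pre_puzzle5 (inputList : List String) : Prop :=
  ∀ p ∈ PySem.List.enumerate inputList 0,
    p.1 = 0 ∨ PySem.Int.mod (3 * p.1) 31 < PySem.Str.len p.2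
instance (inputList : List String) : Decidable (Pre_puzzle5 inputList) := by unfold Pre_puzzle5; infer_instance

def pvWitness_puzzle5 : List String := ["x", "...#......"]

def Spec_puzzle5 (inputList : List String) (out : Int) : Prop := out = puzzle5_alt inputList
instance (inputList : List String) (out : Int) : Decidable (Spec_puzzle5 inputList out) := by unfold Spec_puzzle5; infer_instance

-- ===== CLAIM (what is proved, stated in full; the proofs are below) =====
def Claim_equal_puzzle5 : Prop := ∀ (inputList : List String), Dom_puzzle5 inputList → Pre_puzzle5 inputList → Spec_puzzle5 inputList (puzzle5 inputList)

-- ===== LEMMAS AND PROOFS =====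

-- The count both programs compute over the rows of xs, row p.2 at slope index p.1.
def pvG (xs : List String) (s : Int) : Int :=
  ((PySem.List.enumerate xs s).filter
    (fun iv => decide (0 < iv.1) &&
      decide (PySem.Str.pyGet? iv.2 (PySem.Int.mod (3 * iv.1) 31) = some '#'))).length

-- A's loop invariant: from row index s ≥ 1 with counter c = 3*(s-1), the fold adds pvG xs s.
theorem puzzle5_loopA (xs : List String) (s n : Int) (hs : 1 ≤ s) :
    ((PySem.List.enumerate xs s).foldl
      (fun (st : Int × Int) iv =>
        if iv.1 = 0 then st
        else
          let c := st.1 + 3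
          (c, if PySem.Str.pyGet? iv.2 (PySem.Int.mod c 31) = some '#' then st.2 + 1 else st.2))
      (3 * (s - 1), n)).2 = n + pvG xs s := by
  induction xs generalizing s n with
  | nil => simp [PySem.List.enumerate_nil, pvG]
  | cons v xs ih =>
    rw [pvG, PySem.List.enumerate_cons, List.foldl_cons, List.filter_cons]
    have hne : ¬ (s = 0) := by omega
    have hpos : 0 < s := by omega
    have h3 : 3 * (s - 1) + 3 = 3 * s := by ring
    simp only [if_neg hne, h3, decide_eq_true hpos, Bool.true_and]
    by_cases hget : PySem.Str.pyGet? v (PySem.Int.mod (3 * s) 31) = some '#'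
    · rw [if_pos hget, if_pos (decide_eq_true hget)]
      have h4 : 3 * s = 3 * ((s + 1) - 1) := by ring
      rw [h4, ih (s + 1) (n + 1) (by omega), List.length_cons, pvG]
      push_cast
      ring
    · rw [if_neg hget, if_neg (by simpa using hget)]
      have h4 : 3 * s = 3 * ((s + 1) - 1) := by ring
      rw [h4, ih (s + 1) n (by omega), pvG]

theorem pvG_append (a b : List String) (s : Int) :
    pvG (a ++ b) s = pvG a s + pvG b (s + a.length) := by
  simp [pvG, PySem.List.enumerate_append, List.filter_append]

-- Inner zip loop: if cs lists the column of each row of the chunk, the loop adds pvG chunk s.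
theorem pvInner_eq (chunk : List String) (cs : List Int) (s n : Int) (hs : 1 ≤ s)
    (hc : ∀ (t : Nat), t < chunk.length →
      cs[t]? = some (PySem.Int.mod (3 * (s + t)) 31)) :
    pvInner chunk cs n = n + pvG chunk s := by
  induction chunk generalizing cs s n with
  | nil => simp [pvInner, pvG, PySem.List.enumerate_nil]
  | cons v xs ih =>
    have h0 := hc 0 (by simp)
    cases cs with
    | nil => simp at h0
    | cons c0 cs' =>
      simp only [List.getElem?_cons_zero, Option.some.injEq, Nat.cast_zero, add_zero] at h0
      have hpos : 0 < s := by omega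
      rw [pvInner, List.zip_cons_cons, List.foldl_cons, pvG, PySem.List.enumerate_cons,
        List.filter_cons]
      simp only [decide_eq_true hpos, Bool.true_and, h0]
      have hc' : ∀ (t : Nat), t < xs.length →
          cs'[t]? = some (PySem.Int.mod (3 * ((s + 1) + t)) 31) := by
        intro t ht
        have := hc (t + 1) (by simpa using Nat.succ_lt_succ ht)
        simpa [List.getElem?_cons_succ, Nat.cast_add, add_comm, add_left_comm, add_assoc]
          using this
      by_cases hget : PySem.Str.pyGet? v (PySem.Int.mod (3 * s) 31) = some '#'
      · rw [if_pos hget, if_pos (decide_eq_true hget)]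
        rw [show (xs.zip cs').foldl
            (fun n rc => if PySem.Str.pyGet? rc.1 rc.2 = some '#' then n + 1 else n) (n + 1)
            = pvInner xs cs' (n + 1) from rfl,
          ih cs' (s + 1) (n + 1) (by omega) hc', List.length_cons, pvG]
        push_cast
        ring
      · rw [if_neg hget, if_neg (by simpa using hget)]
        rw [show (xs.zip cs').foldl
            (fun n rc => if PySem.Str.pyGet? rc.1 rc.2 = some '#' then n + 1 else n) n
            = pvInner xs cs' n from rfl,
          ih cs' (s + 1) n (by omega) hc', pvG]

theorem pvPat_getElem? (t : Nat) (ht : t < 31) :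
    pvPat[t]? = some (PySem.Int.mod (3 * ((t : Int) + 1)) 31) := by
  interval_cases t <;> decide

-- Chunk loop: from row index s ≥ 1 with s ≡ 1 (mod 31), pvChunks adds pvG rows s.
theorem pvChunks_eq (N : Nat) (rows : List String) (hN : rows.length ≤ N) (s n : Int)
    (hs : 1 ≤ s) (hdvd : (31 : Int) ∣ (s - 1)) :
    pvChunks rows pvPat n = n + pvG rows s := by
  induction N generalizing rows s n with
  | zero =>
    have : rows = [] := by
      cases rows with
      | nil => rfl
      | cons a l => simp at hN
    subst this
    rw [pvChunks]
    simp [pvG, PySem.List.enumerate_nil]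
  | succ N ih =>
    by_cases hnil : rows = []
    · subst hnil
      rw [pvChunks]
      simp [pvG, PySem.List.enumerate_nil]
    · rw [pvChunks, dif_neg hnil,
        PySem.List.slice_from _ (by norm_num), PySem.List.slice_to _ (by norm_num)]
      have htoNat : ((31 : Int)).toNat = 31 := rfl
      rw [htoNat]
      have hcols : ∀ (t : Nat), t < (rows.take 31).length →
          pvPat[t]? = some (PySem.Int.mod (3 * (s + t)) 31) := by
        intro t ht
        have ht31 : t < 31 := lt_of_lt_of_le ht (by simp [List.length_take])
        rw [pvPat_getElem? t ht31]
        congr 1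
        simp only [PySem.Int.mod_eq_emod_of_pos (show (0:Int) < 31 by norm_num)]
        omega
      rw [show pvInner (rows.take 31) pvPat n = n + pvG (rows.take 31) s from
        pvInner_eq _ _ _ _ hs hcols]
      by_cases hlen : rows.length ≤ 31
      · have hdrop : rows.drop 31 = [] := by
          simp [List.drop_eq_nil_iff, hlen]
        have htake : rows.take 31 = rows := List.take_of_length_le hlen
        rw [hdrop, htake, pvChunks]
        simp
      · have hlen' : (rows.drop 31).length ≤ N := by
          simp only [List.length_drop]
          omega
        rw [ih (rows.drop 31) hlen' (s + 31) (n + pvG (rows.take 31) s) (by omega)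
          (by obtain ⟨m, hm⟩ := hdvd; exact ⟨m + 1, by omega⟩)]
        have hsplit := pvG_append (rows.take 31) (rows.drop 31) s
        rw [List.take_append_drop] at hsplit
        have htl : (rows.take 31).length = 31 := by
          simp [List.length_take]
          omega
        rw [htl] at hsplit
        rw [hsplit]
        push_cast
        ring

-- ===== VERDICT (by name: the statement is the Claim_ definition above) =====
theorem puzzle5_spec : Claim_equal_puzzle5 := by
  intro inputList _ _
  unfold Spec_puzzle5 puzzle5 puzzle5_alt
  rw [PySem.List.slice_from _ (by norm_num)]
  cases inputList with
  | nil =>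
    rw [pvChunks]
    simp [PySem.List.enumerate_nil]
  | cons v xs =>
    rw [PySem.List.enumerate_cons]
    simp only [List.foldl_cons, List.drop_succ_cons, List.drop_zero, Int.toNat_one]
    rw [pvChunks_eq xs.length xs le_rfl 1 0 le_rfl (by norm_num)]
    have hA := puzzle5_loopA xs 1 0 le_rfl
    norm_num at hA ⊢
    exact hA
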